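-- pv_equiv track=rewrite | github.com/theNineTailedKitsune/Enigma-machine | Enigma_Attack.py | max_alignment
-- ===== SOURCE A (Python) =====
-- def max_alignment(string1, string2):
--     if len(string1) == len(string2):
--         max_align = 0
--         length = len(string1)
--         for position in range(length):
--             aligning = 0
--             for i in range(length):
--                 if string1[i]==string2[i]:
--                     aligning +=1
--             if aligning >= max_align:
--                 max_align = aligning
--                 alignment = position
--             string2 = string2[length-1:]+string2[0:length-1]
--         string2 = string2[alignment:]+string2[0:alignment]
--         return alignment , max_align
-- ===== SOURCE B (Python) =====
-- def max_alignment(string1, string2):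
--     if len(string1) != len(string2):
--         return None
--     n = len(string1)
--     pos2 = {}
--     for j, c in enumerate(string2):
--         pos2.setdefault(c, []).append(j)
--     counts = [0] * n
--     for i, c in enumerate(string1):
--         for j in pos2.get(c, ()):
--             counts[(i - j) % n] += 1
--     best = max(counts)
--     for p in range(n - 1, -1, -1):
--         if counts[p] == best:
--             return p, best
-- ===== Notes on version B (the rewrite author's own statement) =====
-- stated objective: alternative
-- what changed: B builds a dictionary mapping each character to its positions in string2, walks string1 once bucketing every matching character pair into a per-shift counter counts[(i-j)%n] (so no per-shift rescan of the strings), then takes max(counts) and finds its last index by a single descending scan.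
import Mathlib
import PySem

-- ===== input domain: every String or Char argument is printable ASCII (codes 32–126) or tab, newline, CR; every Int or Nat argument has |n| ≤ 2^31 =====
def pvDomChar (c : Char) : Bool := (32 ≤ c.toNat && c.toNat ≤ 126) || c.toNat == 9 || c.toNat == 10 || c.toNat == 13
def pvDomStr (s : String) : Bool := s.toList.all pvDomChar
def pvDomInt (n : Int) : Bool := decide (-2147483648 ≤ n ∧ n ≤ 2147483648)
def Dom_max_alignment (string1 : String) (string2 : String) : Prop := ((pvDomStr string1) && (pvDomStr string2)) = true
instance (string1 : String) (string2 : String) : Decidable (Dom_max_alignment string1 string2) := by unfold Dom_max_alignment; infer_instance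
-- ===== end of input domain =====

-- B replaces A's rotate-every-shift scan by a per-character position dictionary whose matching pairs are bucketed into per-shift counts, followed by a descending argmax scan (alternative algorithm; counts only matching character pairs).


-- ===== PORT A =====
-- inner loop: aligning = number of i in range(length) with string1[i] == string2[i]
def pvACount (l1 cur : List Char) (length : Nat) : Int :=
  (List.range length).foldl
    (fun (aligning : Int) (i : Nat) =>
      if PySem.List.pyGet? l1 (i : Int) = PySem.List.pyGet? cur (i : Int) then aligning + 1
      else aligning) 0

-- string2 = string2[length-1:] + string2[0:length-1]
def pvARot (length : Nat) (s : List Char) : List Char :=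
  PySem.List.slice s (some ((length : Int) - 1)) none ++
    PySem.List.slice s (some 0) (some ((length : Int) - 1))

def max_alignment (string1 : String) (string2 : String) : Option (Int × Int) :=
  if string1.toList.length = string2.toList.length then
    let length := string1.toList.length
    let st := (List.range length).foldl
      (fun (st : Int × Option Int × List Char) (position : Nat) =>
        let aligning := pvACount string1.toList st.2.2 length
        if aligning ≥ st.1 then (aligning, some (position : Int), pvARot length st.2.2)
        else (st.1, st.2.1, pvARot length st.2.2))
      (0, none, string2.toList)
    match st.2.1 with
    | some alignment => some (alignment, st.1)    -- (A's final re-rotation of its local string2 does not affect the return value)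
    | none => none                                -- Python raises UnboundLocalError here (only when length = 0); excluded by Pre_
  else none

-- ===== PORT B =====
-- pos2.setdefault(c, []).append(j): modify the bucket of c (default []) by appending j
def pvPos2 (l2 : List Char) : PySem.Dict Char (List Int) :=
  (PySem.List.enumerate l2).foldl
    (fun d jc => d.modify jc.2 [] (fun b => b ++ [jc.1])) PySem.Dict.empty

-- counts[(i - j) % n] += 1   (the index (i - j) % n lies in [0, n), so pyGetD/pySetD are exact)
def pvBStep (n : Nat) (i : Int) (cs : List Int) (j : Int) : List Int :=
  PySem.List.pySetD cs (PySem.Int.mod (i - j) (n : Int))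
    (PySem.List.pyGetD cs (PySem.Int.mod (i - j) (n : Int)) 0 + 1)

def pvCounts (l1 : List Char) (d : PySem.Dict Char (List Int)) (n : Nat) : List Int :=
  (PySem.List.enumerate l1).foldl
    (fun cs ic => (d.getD ic.2 []).foldl (pvBStep n ic.1) cs)
    (List.replicate n 0)

-- for p in range(n - 1, -1, -1): if counts[p] == best: return p, best
def pvFindDown (cs : List Int) (best : Int) : Nat → Option (Int × Int)
  | 0 => none
  | k + 1 =>
    if PySem.List.pyGetD cs (k : Int) 0 = best then some ((k : Int), best)
    else pvFindDown cs best k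

def max_alignment_alt (string1 : String) (string2 : String) : Option (Int × Int) :=
  if string1.toList.length ≠ string2.toList.length then none
  else
    let n := string1.toList.length
    let counts := pvCounts string1.toList (pvPos2 string2.toList) n
    match PySem.List.max? counts (fun x => x) with
    | none => none                                -- max([]) raises ValueError (n = 0); excluded by Pre_
    | some best => pvFindDown counts best n

-- ===== PRECONDITION & SPEC =====
-- Pre_ excludes only the pair of empty strings, on which A raises UnboundLocalError (and B raises ValueError on max([])).
def Pre_max_alignment (string1 : String) (string2 : String) : Prop :=
  ¬ (string1 = "" ∧ string2 = "")
instance (string1 : String) (string2 : String) : Decidable (Pre_max_alignment string1 string2) := by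
  unfold Pre_max_alignment; infer_instance

def pvWitness_max_alignment : String × String := ("abca", "caab")

def Spec_max_alignment (string1 : String) (string2 : String) (out : Option (Int × Int)) : Prop := out = max_alignment_alt string1 string2
instance (string1 : String) (string2 : String) (out : Option (Int × Int)) : Decidable (Spec_max_alignment string1 string2 out) := by unfold Spec_max_alignment; infer_instance

-- ===== CLAIM (what is proved, stated in full; the proofs are below) =====
def Claim_equal_max_alignment : Prop := ∀ (string1 : String) (string2 : String), Dom_max_alignment string1 string2 → Pre_max_alignment string1 string2 → Spec_max_alignment string1 string2 (max_alignment string1 string2)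

-- ===== LEMMAS AND PROOFS =====

-- match count of shift p (proof-side characterisation both ports are reduced to)
def pvBCount (l1 l2 : List Char) (n : Nat) (p : Nat) : Int :=
  ((List.range n).map (fun (i : Nat) =>
    if PySem.List.pyGet? l1 (i : Int) =
        PySem.List.pyGet? l2 (PySem.Int.mod ((i : Int) - (p : Int)) (n : Int)) then (1 : Int)
    else 0)).sum

-- running maximum of f over positions 0..k-1, seeded with 0, updated on ≥ (mirrors A's accumulator `max_align`)
def pvM (f : Nat → Int) : Nat → Int
  | 0 => 0
  | k + 1 => if f k ≥ pvM f k then f k else pvM f k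

-- last position at which the running maximum was updated (mirrors A's `alignment`)
def pvL (f : Nat → Int) : Nat → Option Nat
  | 0 => none
  | k + 1 => if f k ≥ pvM f k then some k else pvL f k

theorem pvBCount_nonneg (l1 l2 : List Char) (n p : Nat) : 0 ≤ pvBCount l1 l2 n p := by
  unfold pvBCount
  apply List.sum_nonneg
  intro x hx
  simp only [List.mem_map] at hx
  obtain ⟨i, _, rfl⟩ := hx
  split <;> omega

theorem pvM_isMax (f : Nat → Int) (k : Nat) : ∀ q, q < k → f q ≤ pvM f k := by
  induction k with
  | zero => intro q h; omega
  | succ k ih =>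
    intro q hq
    simp only [pvM]
    rcases Nat.lt_succ_iff_lt_or_eq.mp hq with h | h
    · have := ih q h; split <;> omega
    · subst h; split <;> omega

theorem pvL_char (f : Nat → Int) (hf : ∀ p, 0 ≤ f p) (k : Nat) (hk : 0 < k) :
    ∃ p, pvL f k = some p ∧ p < k ∧ f p = pvM f k ∧ ∀ q, p < q → q < k → f q < pvM f k := by
  induction k with
  | zero => omega
  | succ k ih =>
    by_cases hge : f k ≥ pvM f k
    · refine ⟨k, ?_, by omega, ?_, ?_⟩
      · simp [pvL, hge]
      · simp [pvM, hge]
      · intro q h1 h2; omega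
    · have hk0 : 0 < k := by
        rcases Nat.eq_zero_or_pos k with h | h
        · exfalso; apply hge; subst h; simpa [pvM] using hf 0
        · exact h
      obtain ⟨p, hL, hlt, hfp, hrest⟩ := ih hk0
      refine ⟨p, ?_, by omega, ?_, ?_⟩
      · simp [pvL, hge, hL]
      · simp only [pvM]; rw [if_neg hge]; exact hfp
      · intro q h1 h2
        simp only [pvM]; rw [if_neg hge]
        rcases Nat.lt_succ_iff_lt_or_eq.mp h2 with h | h
        · exact hrest q h1 h
        · subst h; omega

theorem pvARot_eq_rotate (n : Nat) (s : List Char) (hs : s.length = n) (hn : 0 < n) :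
    pvARot n s = s.rotate (n - 1) := by
  unfold pvARot
  have hcast : (n : Int) - 1 = ((n - 1 : Nat) : Int) := by omega
  rw [hcast, PySem.List.slice_zero_start, PySem.List.slice_from_natCast,
    PySem.List.slice_to_natCast, List.rotate_eq_drop_append_take (by omega)]

theorem pvGet_rotate (l2 : List Char) (n : Nat) (h2 : l2.length = n) (hn : 0 < n)
    (p i : Nat) (hi : i < n) :
    PySem.List.pyGet? (l2.rotate (p * (n - 1))) (i : Int) =
      PySem.List.pyGet? l2 (PySem.Int.mod ((i : Int) - (p : Int)) (n : Int)) := by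
  have hlen : (l2.rotate (p * (n - 1))).length = n := by simp [h2]
  have hm := PySem.Int.mod_eq_emod_of_pos (a := (i : Int) - (p : Int)) (b := (n : Int)) (by omega)
  have hmn : 0 ≤ ((i : Int) - (p : Int)) % (n : Int) := Int.emod_nonneg _ (by omega)
  have hml : ((i : Int) - (p : Int)) % (n : Int) < (n : Int) := Int.emod_lt_of_pos _ (by omega)
  rw [hm, PySem.List.pyGet?_natCast, PySem.List.pyGet?_of_nonneg (h := hmn)]
  have hidx : ((i : Int) - (p : Int)) % (n : Int) = (((i + p * (n - 1)) % n : Nat) : Int) := by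
    push_cast
    have h1 : ((i : Int) + (p : Int) * ((n : Int) - 1)) = ((i : Int) - (p : Int)) + (p : Int) * (n : Int) := by ring
    have h2' : ((n - 1 : Nat) : Int) = (n : Int) - 1 := by omega
    rw [h2', h1, Int.add_mul_emod_self_right _ _ _]
  have htn : (((i : Int) - (p : Int)) % (n : Int)).toNat = (i + p * (n - 1)) % n := by omega
  rw [htn]
  rw [List.getElem?_eq_getElem (by omega), List.getElem?_eq_getElem (by rw [h2]; exact Nat.mod_lt _ hn)]
  congr 1
  rw [List.getElem_rotate]
  congr 1
  rw [h2]

theorem pvACount_rotate (l1 l2 : List Char) (n : Nat) (h2 : l2.length = n)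
    (hn : 0 < n) (p : Nat) :
    pvACount l1 (l2.rotate (p * (n - 1))) n = pvBCount l1 l2 n p := by
  unfold pvACount pvBCount
  rw [PySem.List.foldl_ite_add_one]
  have hbool : (fun (i : Nat) =>
      if PySem.List.pyGet? l1 (i : Int) = PySem.List.pyGet? l2 (PySem.Int.mod ((i : Int) - (p : Int)) (n : Int))
      then (1 : Int) else 0)
      = (fun (i : Nat) =>
      if decide (PySem.List.pyGet? l1 (i : Int) = PySem.List.pyGet? l2 (PySem.Int.mod ((i : Int) - (p : Int)) (n : Int))) = true
      then (1 : Int) else 0) := by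
    funext i; simp
  rw [hbool, PySem.List.sum_map_ite_one_zero, Int.zero_add]
  congr 1
  apply List.countP_congr
  intro x hx
  simp only [List.mem_range] at hx
  rw [pvGet_rotate l2 n h2 hn p x hx]

theorem pvFoldA (l1 l2 : List Char) (n : Nat) (h2 : l2.length = n)
    (hn : 0 < n) (k : Nat) :
    (List.range k).foldl
      (fun (st : Int × Option Int × List Char) (position : Nat) =>
        let aligning := pvACount l1 st.2.2 n
        if aligning ≥ st.1 then (aligning, some (position : Nat), pvARot n st.2.2)
        else (st.1, st.2.1, pvARot n st.2.2))
      (0, none, l2)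
    = (pvM (pvBCount l1 l2 n) k, (pvL (pvBCount l1 l2 n) k).map (fun (q : Nat) => (q : Int)),
        l2.rotate (k * (n - 1))) := by
  induction k with
  | zero => simp [pvM, pvL]
  | succ k ih =>
    rw [List.range_succ, List.foldl_append, ih]
    have hrotlen : (l2.rotate (k * (n - 1))).length = n := by simp [h2]
    simp only [List.foldl_cons, List.foldl_nil]
    rw [pvARot_eq_rotate n _ hrotlen hn, List.rotate_rotate]
    have hA : pvACount l1 (l2.rotate (k * (n - 1))) n = pvBCount l1 l2 n k :=
      pvACount_rotate l1 l2 n h2 hn k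
    have hexp : k * (n - 1) + (n - 1) = (k + 1) * (n - 1) := by ring
    simp only [hA, hexp]
    by_cases hge : pvBCount l1 l2 n k ≥ pvM (pvBCount l1 l2 n) k
    · simp [hge, pvM, pvL]
    · simp [hge, pvM, pvL]

theorem pvMax?_eq (f : Nat → Int) (n : Nat)
    (hmem : ∀ q, q < n → f q ≤ pvM f n) (p : Nat) (hp : p < n) (hfp : f p = pvM f n) :
    PySem.List.max? ((List.range n).map f) (fun x => x) = some (pvM f n) := by
  have hne : ((List.range n).map f) ≠ [] := by simp; omega
  obtain ⟨m, hm⟩ : ∃ m, PySem.List.max? ((List.range n).map f) (fun x => x) = some m := by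
    cases hmax : PySem.List.max? ((List.range n).map f) (fun x => x) with
    | none => exact absurd ((PySem.List.max?_eq_none_iff _ _).mp hmax) hne
    | some m => exact ⟨m, rfl⟩
  rw [hm]
  have hmmem := PySem.List.max?_mem hm
  simp only [List.mem_map, List.mem_range] at hmmem
  obtain ⟨q, hq, rfl⟩ := hmmem
  have hub := PySem.List.max?_isMax hm (f p) (by simp only [List.mem_map, List.mem_range]; exact ⟨p, hp, rfl⟩)
  have := hmem q hq
  simp only [Option.some.injEq]
  omega

-- ---- B-side lemmas ----

theorem pvPos2_getD (l2 : List Char) (c : Char) :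
    (pvPos2 l2).getD c [] =
      ((PySem.List.enumerate l2).filter (fun jc => jc.2 == c)).map (fun jc => jc.1) := by
  unfold pvPos2
  have h : (PySem.List.enumerate l2).foldl
        (fun d jc => d.modify jc.2 [] (fun b => b ++ [jc.1])) PySem.Dict.empty
      = ((PySem.List.enumerate l2).map (fun jc => (jc.2, jc.1))).foldl
          (fun d p => d.modify p.1 [] (fun b => b ++ [p.2])) PySem.Dict.empty := by
    rw [List.foldl_map]
  rw [h, PySem.Dict.getD_foldl_modify_append]
  simp [List.filter_map, List.map_map, Function.comp_def]

theorem pvBucket_mem (l2 : List Char) (c : Char) (x : Int) :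
    x ∈ ((PySem.List.enumerate l2).filter (fun jc => jc.2 == c)).map (fun jc => jc.1)
      ↔ ∃ (k : Nat) (h : k < l2.length), x = (k : Int) ∧ l2[k] = c := by
  simp only [List.mem_map, List.mem_filter, PySem.List.mem_enumerate_iff]
  constructor
  · rintro ⟨⟨a, b⟩, ⟨⟨k, hk, hp⟩, hb⟩, rfl⟩
    rw [Prod.mk.injEq] at hp
    obtain ⟨h1, h2⟩ := hp
    refine ⟨k, hk, by simp [h1], ?_⟩
    rw [h2] at hb; simpa using hb.symm
  · rintro ⟨k, hk, rfl, hc⟩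
    exact ⟨((k : Int), l2[k]), ⟨⟨k, hk, by simp⟩, by simpa using hc⟩, rfl⟩

theorem pvBucket_nodup (l2 : List Char) (c : Char) :
    (((PySem.List.enumerate l2).filter (fun jc => jc.2 == c)).map (fun jc => jc.1)).Nodup := by
  have h2 := (PySem.List.pairwise_lt_enumerate l2 0).filter (fun jc => jc.2 == c)
  have h3 : (((PySem.List.enumerate l2).filter (fun jc => jc.2 == c)).map
      (fun jc => jc.1)).Pairwise (· < ·) := by
    rw [List.pairwise_map]; exact h2
  exact h3.imp (fun h => ne_of_lt h)

theorem pvBStep_foldl_length (n : Nat) (i : Int) (J : List Int) (cs : List Int) :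
    (J.foldl (pvBStep n i) cs).length = cs.length := by
  induction J generalizing cs with
  | nil => rfl
  | cons j J ih =>
    rw [List.foldl_cons, ih]
    exact PySem.List.length_pySetD _ _ _

theorem pvCounts_length (l1 : List Char) (d : PySem.Dict Char (List Int)) (n : Nat) :
    (pvCounts l1 d n).length = n := by
  unfold pvCounts
  have : ∀ (L : List (Int × Char)) (cs : List Int),
      (L.foldl (fun cs ic => (d.getD ic.2 []).foldl (pvBStep n ic.1) cs) cs).length = cs.length := by
    intro L
    induction L with
    | nil => intro cs; rfl
    | cons ic L ih =>
      intro cs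
      rw [List.foldl_cons, ih, pvBStep_foldl_length]
  rw [this, List.length_replicate]

-- matching pairs flattened to their shift values
def pvDList (l1 l2 : List Char) (n : Nat) : List Int :=
  (PySem.List.enumerate l1).flatMap
    (fun ic => (((PySem.List.enumerate l2).filter (fun jc => jc.2 == ic.2)).map (fun jc => jc.1)).map
      (fun j => PySem.Int.mod (ic.1 - j) (n : Int)))

theorem pvCounts_eq_flat (l1 l2 : List Char) (n : Nat) :
    pvCounts l1 (pvPos2 l2) n
      = (pvDList l1 l2 n).foldl
          (fun cs m => PySem.List.pySetD cs m (PySem.List.pyGetD cs m 0 + 1))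
          (List.replicate n 0) := by
  unfold pvCounts pvDList
  rw [List.foldl_flatMap]
  congr 1
  funext cs ic
  rw [pvPos2_getD]
  simp only [List.foldl_map]
  rfl

theorem pvDList_bounds (l1 l2 : List Char) (n : Nat) (hn : 0 < n) :
    ∀ m ∈ pvDList l1 l2 n, 0 ≤ m ∧ m < (n : Int) := by
  intro m hm
  unfold pvDList at hm
  simp only [List.mem_flatMap, List.mem_map] at hm
  obtain ⟨ic, _, j, _, rfl⟩ := hm
  rw [PySem.Int.mod_eq_emod_of_pos (by omega)]
  exact ⟨Int.emod_nonneg _ (by omega), Int.emod_lt_of_pos _ (by omega)⟩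

theorem pvShiftIff (i k p n : Int) (hk0 : 0 ≤ k) (hkn : k < n)
    (hp0 : 0 ≤ p) (hpn : p < n) : (i - k) % n = p ↔ k = (i - p) % n := by
  have key : ∀ a b : Int, (a - (a - b) % n) % n = b % n := by
    intro a b
    calc (a - (a - b) % n) % n = (a - (a - b)) % n := by
          rw [Int.sub_emod a ((a - b) % n) n, Int.emod_emod_of_dvd _ (dvd_refl n), ← Int.sub_emod]
      _ = b % n := by ring_nf
  constructor
  · intro h
    rw [← h, key, Int.emod_eq_of_lt hk0 hkn]
  · intro h
    rw [h, key, Int.emod_eq_of_lt hp0 hpn]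

theorem pvBump_getD (D : List Int) (cs : List Int)
    (hD : ∀ m ∈ D, 0 ≤ m ∧ m < (cs.length : Int)) (p : Nat) (hp : p < cs.length) :
    (D.foldl (fun cs m => PySem.List.pySetD cs m (PySem.List.pyGetD cs m 0 + 1)) cs).getD p 0
      = cs.getD p 0 + (D.count (p : Int) : Int) := by
  induction D generalizing cs with
  | nil => simp
  | cons m D ih =>
    obtain ⟨hm0, hml⟩ := hD m (by simp)
    have hset : PySem.List.pySetD cs m (PySem.List.pyGetD cs m 0 + 1)
        = cs.set m.toNat (PySem.List.pyGetD cs m 0 + 1) :=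
      PySem.List.pySetD_of_nonneg _ _ hm0
    have hlen : (PySem.List.pySetD cs m (PySem.List.pyGetD cs m 0 + 1)).length = cs.length :=
      PySem.List.length_pySetD _ _ _
    rw [List.foldl_cons, ih _ (by intro x hx; rw [hlen]; exact hD x (by simp [hx])) (by omega)]
    have hgd : ∀ (q : Nat), q < cs.length →
        (PySem.List.pySetD cs m (PySem.List.pyGetD cs m 0 + 1)).getD q 0
          = if m.toNat = q then cs.getD q 0 + 1 else cs.getD q 0 := by
      intro q hq
      rw [hset, List.getD_eq_getElem?_getD, List.getElem?_set, List.getD_eq_getElem?_getD]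
      by_cases hmq : m.toNat = q
      · subst hmq
        rw [if_pos rfl, if_pos (by omega), PySem.List.pyGetD_eq_getElem _ _ hm0 (by omega),
          List.getElem?_eq_getElem hq]
        simp
      · rw [if_neg hmq, if_neg hmq]
    rw [hgd p hp, List.count_cons]
    by_cases hmp : m.toNat = p
    · have : m = (p : Int) := by omega
      rw [if_pos hmp, if_pos (by simp [this])]
      push_cast; ring
    · have : ¬ (m == (p : Int)) := by simp; omega
      rw [if_neg hmp, if_neg this]
      push_cast; ring

theorem pvEnum_eq_map_range (l : List Char) :
    PySem.List.enumerate l 0 = (List.range l.length).map (fun (k : Nat) => ((k : Int), l.getD k ' ')) := by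
  apply List.ext_getElem?
  intro k
  rw [PySem.List.getElem?_enumerate]
  by_cases hk : k < l.length
  · rw [List.getElem?_eq_getElem hk, List.getElem?_map, List.getElem?_range hk]
    simp [List.getD_eq_getElem?_getD, List.getElem?_eq_getElem hk]
  · rw [List.getElem?_eq_none (by omega), List.getElem?_eq_none (by simp; omega)]
    rfl

theorem pvInner_count (l1 l2 : List Char) (n : Nat) (h1 : l1.length = n) (h2 : l2.length = n)
    (hn : 0 < n) (p i : Nat) (hp : p < n) (hi : i < n) :
    ((((PySem.List.enumerate l2).filter (fun jc => jc.2 == l1.getD i ' ')).map (fun jc => jc.1)).map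
        (fun j => PySem.Int.mod ((i : Int) - j) (n : Int))).count ((p : Int))
      = if PySem.List.pyGet? l1 (i : Int) =
            PySem.List.pyGet? l2 (PySem.Int.mod ((i : Int) - (p : Int)) (n : Int))
        then 1 else 0 := by
  have hmEq := PySem.Int.mod_eq_emod_of_pos (a := (i : Int) - (p : Int)) (b := (n : Int)) (by omega)
  have hm0 : 0 ≤ ((i : Int) - (p : Int)) % (n : Int) := Int.emod_nonneg _ (by omega)
  have hmn : ((i : Int) - (p : Int)) % (n : Int) < (n : Int) := Int.emod_lt_of_pos _ (by omega)
  have hmt : (((i : Int) - (p : Int)) % (n : Int)).toNat < l2.length := by omega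
  -- count on a map = countP on the bucket; on the bucket the predicate is exactly (· == (i-p) % n)
  have hcount : ((((PySem.List.enumerate l2).filter (fun jc => jc.2 == l1.getD i ' ')).map
          (fun jc => jc.1)).map
        (fun j => PySem.Int.mod ((i : Int) - j) (n : Int))).count ((p : Int))
      = (((PySem.List.enumerate l2).filter (fun jc => jc.2 == l1.getD i ' ')).map
          (fun jc => jc.1)).count (((i : Int) - (p : Int)) % (n : Int)) := by
    rw [List.count_eq_countP, List.count_eq_countP, List.countP_map]
    apply List.countP_congr
    intro x hx
    obtain ⟨k, hk, rfl, -⟩ := (pvBucket_mem l2 (l1.getD i ' ') x).mp hx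
    simp only [Function.comp_apply]
    rw [PySem.Int.mod_eq_emod_of_pos (by omega), Bool.eq_iff_iff]
    simp only [beq_iff_eq, iff_true]
    exact pvShiftIff (i : Int) (k : Int) (p : Int) (n : Int) (by omega) (by omega)
      (by omega) (by omega)
  rw [hcount, hmEq]
  -- the bucket holds (i-p) % n iff l2 matches l1 there
  have hmemIff : ((i : Int) - (p : Int)) % (n : Int) ∈
        (((PySem.List.enumerate l2).filter (fun jc => jc.2 == l1.getD i ' ')).map (fun jc => jc.1))
      ↔ l2[(((i : Int) - (p : Int)) % (n : Int)).toNat]'hmt = l1.getD i ' ' := by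
    rw [pvBucket_mem]
    constructor
    · rintro ⟨k, hk, hkm, hc⟩
      have hkk : (((i : Int) - (p : Int)) % (n : Int)).toNat = k := by omega
      subst hkk
      exact hc
    · intro h
      exact ⟨(((i : Int) - (p : Int)) % (n : Int)).toNat, hmt, by omega, h⟩
  have hget1 : PySem.List.pyGet? l1 (i : Int) = some (l1.getD i ' ') := by
    rw [PySem.List.pyGet?_natCast, List.getElem?_eq_getElem (by omega),
      List.getD_eq_getElem?_getD, List.getElem?_eq_getElem (by omega)]
    rfl
  have hget2 : PySem.List.pyGet? l2 (((i : Int) - (p : Int)) % (n : Int))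
      = some (l2[(((i : Int) - (p : Int)) % (n : Int)).toNat]'hmt) := by
    rw [PySem.List.pyGet?_of_nonneg (h := hm0), List.getElem?_eq_getElem hmt]
  rw [hget1, hget2]
  by_cases hmem : ((i : Int) - (p : Int)) % (n : Int) ∈
      (((PySem.List.enumerate l2).filter (fun jc => jc.2 == l1.getD i ' ')).map (fun jc => jc.1))
  · rw [List.count_eq_one_of_mem (pvBucket_nodup l2 _) hmem,
      if_pos (by rw [Option.some.injEq]; exact (hmemIff.mp hmem).symm)]
  · rw [List.count_eq_zero_of_not_mem hmem,
      if_neg (by rw [Option.some.injEq]; intro h; exact hmem (hmemIff.mpr h.symm))]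

theorem pvDList_count (l1 l2 : List Char) (n : Nat) (h1 : l1.length = n) (h2 : l2.length = n)
    (hn : 0 < n) (p : Nat) (hp : p < n) :
    ((pvDList l1 l2 n).count ((p : Int)) : Int) = pvBCount l1 l2 n p := by
  unfold pvDList pvBCount
  rw [List.count_flatMap, pvEnum_eq_map_range l1, h1, List.map_map, Nat.cast_list_sum,
    List.map_map]
  congr 1
  apply List.map_congr_left
  intro k hk
  simp only [List.mem_range] at hk
  simp only [Function.comp_apply]
  rw [pvInner_count l1 l2 n h1 h2 hn p k hp hk]
  split <;> simp

theorem pvCounts_getD (l1 l2 : List Char) (n : Nat) (h1 : l1.length = n) (h2 : l2.length = n)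
    (hn : 0 < n) (p : Nat) (hp : p < n) :
    (pvCounts l1 (pvPos2 l2) n).getD p 0 = pvBCount l1 l2 n p := by
  rw [pvCounts_eq_flat,
    pvBump_getD _ _ (by rw [List.length_replicate]; exact pvDList_bounds l1 l2 n hn) p
      (by rw [List.length_replicate]; exact hp)]
  rw [List.getD_eq_getElem?_getD, List.getElem?_replicate]
  rw [if_pos hp]
  rw [pvDList_count l1 l2 n h1 h2 hn p hp]
  simp

theorem pvCounts_eq_map (l1 l2 : List Char) (n : Nat) (h1 : l1.length = n)
    (h2 : l2.length = n) (hn : 0 < n) :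
    pvCounts l1 (pvPos2 l2) n = (List.range n).map (pvBCount l1 l2 n) := by
  apply List.ext_getElem (by rw [pvCounts_length]; simp)
  intro k hk1 hk2
  have hkn : k < n := by rw [pvCounts_length] at hk1; exact hk1
  rw [List.getElem_map, List.getElem_range]
  rw [← pvCounts_getD l1 l2 n h1 h2 hn k hkn, List.getD_eq_getElem?_getD,
    List.getElem?_eq_getElem hk1]
  rfl

theorem pvFindDown_eq (cs : List Int) (f : Nat → Int) (best : Int) (n p : Nat)
    (hg : ∀ q, q < n → cs.getD q 0 = f q) (hp : p < n) (hfp : f p = best)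
    (hlast : ∀ q, p < q → q < n → f q < best) :
    ∀ k, p < k → k ≤ n → pvFindDown cs best k = some ((p : Int), best) := by
  intro k
  induction k with
  | zero => omega
  | succ k ih =>
    intro h1 h2
    simp only [pvFindDown, PySem.List.pyGetD_natCast]
    by_cases hk : k = p
    · subst hk
      rw [hg k (by omega), hfp, if_pos rfl]
    · have hlt : f k < best := hlast k (by omega) (by omega)
      rw [hg k (by omega), if_neg (by omega)]
      exact ih (by omega) (by omega)

-- ===== VERDICT (by name: the statement is the Claim_ definition above) =====
theorem max_alignment_spec : Claim_equal_max_alignment := by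
  intro string1 string2 _ hpre
  unfold Spec_max_alignment max_alignment max_alignment_alt
  by_cases hlen : string1.toList.length = string2.toList.length
  · rw [if_pos hlen, if_neg (fun h => h hlen)]
    have hn : 0 < string1.toList.length := by
      rcases Nat.eq_zero_or_pos string1.toList.length with h0 | h
      · exfalso
        apply hpre
        refine ⟨String.toList_eq_nil_iff.mp ?_, String.toList_eq_nil_iff.mp ?_⟩
        · exact List.length_eq_zero_iff.mp h0
        · exact List.length_eq_zero_iff.mp (by omega)
      · exact h
    simp only []
    rw [pvFoldA string1.toList string2.toList string1.toList.length hlen.symm hn]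
    obtain ⟨p, hL, hp, hfp, hlast⟩ :=
      pvL_char (pvBCount string1.toList string2.toList string1.toList.length)
        (pvBCount_nonneg string1.toList string2.toList string1.toList.length)
        string1.toList.length hn
    rw [pvCounts_eq_map string1.toList string2.toList string1.toList.length rfl hlen.symm hn,
      pvMax?_eq (pvBCount string1.toList string2.toList string1.toList.length)
        string1.toList.length
        (pvM_isMax (pvBCount string1.toList string2.toList string1.toList.length)
          string1.toList.length) p hp hfp,
      hL]
    have hg : ∀ q, q < string1.toList.length →
        (((List.range string1.toList.length).map
            (pvBCount string1.toList string2.toList string1.toList.length)).getD q 0)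
          = pvBCount string1.toList string2.toList string1.toList.length q := by
      intro q hq
      rw [List.getD_eq_getElem?_getD, List.getElem?_map, List.getElem?_range hq]
      rfl
    exact (pvFindDown_eq
      ((List.range string1.toList.length).map
        (pvBCount string1.toList string2.toList string1.toList.length))
      (pvBCount string1.toList string2.toList string1.toList.length)
      (pvM (pvBCount string1.toList string2.toList string1.toList.length) string1.toList.length)
      string1.toList.length p hg hp hfp hlast string1.toList.length hp (le_refl _)).symm
  · rw [if_neg hlen, if_pos hlen]
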